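-- pv_equiv track=rewrite | github.com/pypi-data/pypi-mirror-49 | packages/mag/mag-0.0.12-py3-none-any.whl/mag/np/mat.py | unravel_merged_matrices
-- ===== SOURCE A (Python) =====
-- def unravel_merged_matrices(merged_flattened_index:int, elements_in_matrices:list):
--     '''
--     Arguments:
--         merged_flattened_index (int): the index of the element in the merged,
--             flattened matrix
--         elements_in_matrices (list): a list of integers corresponding to the
--             number of elements in the matrix at the corresponding index
--     Returns:
--         flattened_index (int): the flattened index for the matrix to which
--             merged_flattened_index belongs to
--         matrix_index (int): the index correspoinding to the matrix to which the
--             flattened_index belongs to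
--
--     '''
--     flattened_index = merged_flattened_index
--     matrix_index = -1
--     for i, num_elements in enumerate(elements_in_matrices):
--         if flattened_index < num_elements:
--             matrix_index = i
--             break
--         flattened_index -= num_elements
--     return (flattened_index, matrix_index)
-- ===== SOURCE B (Python) =====
-- def unravel_merged_matrices(merged_flattened_index: int, elements_in_matrices: list):
--     # Build the prefix-sum table of element counts, then locate the first
--     # boundary that strictly exceeds the merged index.
--     cum = [0]
--     for n in elements_in_matrices:
--         cum.append(cum[-1] + n)
--     for i, (lo, hi) in enumerate(zip(cum, cum[1:])):
--         if merged_flattened_index < hi: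
--             return (merged_flattened_index - lo, i)
--     return (merged_flattened_index - cum[-1], -1)
-- ===== Notes on version B (the rewrite author's own statement) =====
-- stated objective: alternative
-- what changed: Replaces the subtract-as-you-scan walk with a two-phase method: build the prefix-sum boundary table once, then scan adjacent boundary pairs to find the first one exceeding the index, comparing against absolute thresholds instead of mutating a remainder.
import Mathlib
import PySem

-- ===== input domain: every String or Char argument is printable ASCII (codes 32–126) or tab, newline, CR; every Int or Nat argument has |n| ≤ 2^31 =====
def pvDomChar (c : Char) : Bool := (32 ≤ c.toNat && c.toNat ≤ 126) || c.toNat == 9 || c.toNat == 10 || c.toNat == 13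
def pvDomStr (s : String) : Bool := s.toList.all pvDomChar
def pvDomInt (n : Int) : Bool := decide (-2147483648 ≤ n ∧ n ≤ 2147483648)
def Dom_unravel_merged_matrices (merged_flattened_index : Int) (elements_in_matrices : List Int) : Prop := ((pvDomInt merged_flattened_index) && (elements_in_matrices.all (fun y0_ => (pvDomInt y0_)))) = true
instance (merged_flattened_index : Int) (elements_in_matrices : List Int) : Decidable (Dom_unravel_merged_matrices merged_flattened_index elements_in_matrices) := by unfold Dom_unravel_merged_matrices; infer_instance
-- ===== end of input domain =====

-- B builds the prefix-sum boundary table once and scans adjacent boundary pairs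
-- for the first threshold exceeding the index (alternative, same cost as A).

-- ===== PORT A =====
-- A's for-loop with break: state (flattened_index, enumerate counter i)
def pvA_loop (flattened_index : Int) (i : Int) : List Int → Int × Int
  | [] => (flattened_index, -1)
  | num_elements :: rest =>
    if flattened_index < num_elements then (flattened_index, i)
    else pvA_loop (flattened_index - num_elements) (i + 1) rest

def unravel_merged_matrices (merged_flattened_index : Int) (elements_in_matrices : List Int) : Int × Int :=
  pvA_loop merged_flattened_index 0 elements_in_matrices

-- ===== PORT B =====
-- B's second loop (early return modeled by Option; none = loop fell through)
def pvB_search (m : Int) (i : Int) : List (Int × Int) → Option (Int × Int)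
  | [] => none
  | (lo, hi) :: rest => if m < hi then some (m - lo, i) else pvB_search m (i + 1) rest

def unravel_merged_matrices_alt (merged_flattened_index : Int) (elements_in_matrices : List Int) : Int × Int :=
  -- cum = [0]; for n in elements_in_matrices: cum.append(cum[-1] + n)
  let cum : List Int := elements_in_matrices.foldl (fun c n => c ++ [c.getLastD 0 + n]) [0]
  -- for i, (lo, hi) in enumerate(zip(cum, cum[1:])): …
  match pvB_search merged_flattened_index 0 (cum.zip cum.tail) with
  | some r => r
  | none => (merged_flattened_index - cum.getLastD 0, -1)

-- ===== PRECONDITION & SPEC =====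
def Spec_unravel_merged_matrices (merged_flattened_index : Int) (elements_in_matrices : List Int) (out : Int × Int) : Prop := out = unravel_merged_matrices_alt merged_flattened_index elements_in_matrices
instance (merged_flattened_index : Int) (elements_in_matrices : List Int) (out : Int × Int) : Decidable (Spec_unravel_merged_matrices merged_flattened_index elements_in_matrices out) := by unfold Spec_unravel_merged_matrices; infer_instance

-- ===== CLAIM (what is proved, stated in full; the proofs are below) =====
def Claim_equal_unravel_merged_matrices : Prop := ∀ (merged_flattened_index : Int) (elements_in_matrices : List Int), Dom_unravel_merged_matrices merged_flattened_index elements_in_matrices → Spec_unravel_merged_matrices merged_flattened_index elements_in_matrices (unravel_merged_matrices merged_flattened_index elements_in_matrices)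

-- ===== LEMMAS AND PROOFS =====

-- mathematical description of B's prefix-sum table starting at base b
def pvPrefixes (b : Int) : List Int → List Int
  | [] => [b]
  | e :: r => b :: pvPrefixes (b + e) r

theorem pvPrefixes_ne_nil (b : Int) (es : List Int) : pvPrefixes b es ≠ [] := by
  cases es <;> simp [pvPrefixes]

theorem pvGetLast?_cons {b : Int} {l : List Int} (h : l ≠ []) :
    (b :: l).getLast? = l.getLast? := by
  cases l with
  | nil => exact absurd rfl h
  | cons x xs => exact List.getLast?_cons_cons

theorem pvFoldl_cum (es : List Int) : ∀ (acc : List Int) (b : Int),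
    es.foldl (fun c n => c ++ [c.getLastD 0 + n]) (acc ++ [b]) = acc ++ pvPrefixes b es := by
  induction es with
  | nil => intro acc b; simp [pvPrefixes]
  | cons e r ih =>
    intro acc b
    have h1 : (acc ++ [b]) ++ [(acc ++ [b]).getLastD 0 + e] = (acc ++ [b]) ++ [b + e] := by
      simp
    simp only [List.foldl_cons]
    rw [h1, List.append_assoc]
    have := ih (acc ++ [b]) (b + e)
    simpa [pvPrefixes, List.append_assoc] using this

theorem pvPrefixes_getLastD (b : Int) (es : List Int) :
    (pvPrefixes b es).getLastD 0 = b + es.sum := by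
  induction es generalizing b with
  | nil => simp [pvPrefixes]
  | cons e r ih =>
    have hih := ih (b + e)
    rw [List.getLastD_eq_getLast?] at hih ⊢
    simp only [pvPrefixes]
    rw [pvGetLast?_cons (pvPrefixes_ne_nil (b + e) r), hih, List.sum_cons]
    ring

-- the core invariant: A's subtract-as-you-go loop agrees with B's scan of the
-- boundary pairs built from base b, for any enumerate counter i
theorem pvMain (es : List Int) : ∀ (b i m : Int),
    pvA_loop (m - b) i es =
      (match pvB_search m i ((pvPrefixes b es).zip (pvPrefixes b es).tail) with
       | some r => r
       | none => (m - (pvPrefixes b es).getLastD 0, -1)) := by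
  induction es with
  | nil => intro b i m; simp [pvPrefixes, pvA_loop, pvB_search]
  | cons e r ih =>
    intro b i m
    have hhead : ∃ t, pvPrefixes (b + e) r = (b + e) :: t := by
      cases r <;> exact ⟨_, rfl⟩
    obtain ⟨t, ht⟩ := hhead
    have hzip : (pvPrefixes b (e :: r)).zip (pvPrefixes b (e :: r)).tail
        = (b, b + e) :: ((pvPrefixes (b + e) r).zip (pvPrefixes (b + e) r).tail) := by
      simp [pvPrefixes, ht]
    rw [hzip]
    by_cases h : m < b + e
    · have h' : m - b < e := by omega
      simp [pvA_loop, pvB_search, h, h']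
    · have h' : ¬ m - b < e := by omega
      have hA : pvA_loop (m - b) i (e :: r) = pvA_loop (m - (b + e)) (i + 1) r := by
        have hsub : m - b - e = m - (b + e) := by ring
        simp [pvA_loop, h', hsub]
      have hB : pvB_search m i ((b, b + e) :: ((pvPrefixes (b + e) r).zip (pvPrefixes (b + e) r).tail))
          = pvB_search m (i + 1) ((pvPrefixes (b + e) r).zip (pvPrefixes (b + e) r).tail) := by
        simp [pvB_search, h]
      rw [hA, hB, ih (b + e) (i + 1) m]
      rcases hs : pvB_search m (i + 1) ((pvPrefixes (b + e) r).zip (pvPrefixes (b + e) r).tail) with _ | v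
      · rw [pvPrefixes_getLastD, pvPrefixes_getLastD, List.sum_cons]
        have : b + e + r.sum = b + (e + r.sum) := by ring
        rw [this]
      · rfl

-- ===== VERDICT (by name: the statement is the Claim_ definition above) =====
theorem unravel_merged_matrices_spec : Claim_equal_unravel_merged_matrices := by
  intro m es _
  unfold Spec_unravel_merged_matrices unravel_merged_matrices unravel_merged_matrices_alt
  have hfold : es.foldl (fun c n => c ++ [c.getLastD 0 + n]) [0] = pvPrefixes 0 es := by
    simpa using pvFoldl_cum es [] 0
  rw [hfold]
  have := pvMain es 0 0 m
  simpa using this
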